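-- pv_equiv track=rewrite | github.com/potentialgenie/ai_team_orchestrator | backend/concrete_asset_extractor_refactored.py | _ai_extract_content_themes
-- ===== SOURCE A (Python) =====
-- from typing import Dict, Any, List, Optional
--
-- def _ai_extract_content_themes(workspace_goal: str, content_type: str) -> List[str]:
--     """AI-driven theme extraction - works for ANY domain"""
--     goal_lower = workspace_goal.lower()
--     content_lower = content_type.lower()
--
--     # Universal theme patterns based on goal intent
--     if any(term in goal_lower for term in ['nurture', 'education', 'learning']):
--         return ["Educational", "Informative", "Skill-Building"]
--     elif any(term in goal_lower for term in ['sales', 'convert', 'sell', 'revenue']):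
--         return ["Persuasive", "Value-Driven", "Results-Focused"]
--     elif any(term in goal_lower for term in ['engage', 'community', 'social']):
--         return ["Engaging", "Community-Building", "Interactive"]
--     elif any(term in goal_lower for term in ['train', 'fitness', 'health', 'workout']):
--         return ["Beginner-Friendly", "Progressive", "Advanced"]
--     elif any(term in goal_lower for term in ['create', 'build', 'develop']):
--         return ["Foundational", "Progressive", "Advanced"]
--     else:
--         # Universal fallback themes for ANY goal
--         return ["Introductory", "Core", "Advanced"]
-- ===== SOURCE B (Python) =====
-- # B: no if/elif chain -- flatten keywords into a keyword -> group-index map,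
-- # compute the minimum matching group index in one aggregating pass, and index a theme table.
-- _KEYWORD_GROUP = {
--     "nurture": 0, "education": 0, "learning": 0,
--     "sales": 1, "convert": 1, "sell": 1, "revenue": 1,
--     "engage": 2, "community": 2, "social": 2,
--     "train": 3, "fitness": 3, "health": 3, "workout": 3,
--     "create": 4, "build": 4, "develop": 4,
-- }
--
-- _THEMES = [
--     ["Educational", "Informative", "Skill-Building"],
--     ["Persuasive", "Value-Driven", "Results-Focused"],
--     ["Engaging", "Community-Building", "Interactive"],
--     ["Beginner-Friendly", "Progressive", "Advanced"],
--     ["Foundational", "Progressive", "Advanced"],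
--     ["Introductory", "Core", "Advanced"],
-- ]
--
-- def _ai_extract_content_themes(workspace_goal: str, content_type: str) -> list:
--     goal_lower = workspace_goal.lower()
--     best = 5
--     for kw, i in _KEYWORD_GROUP.items():
--         if kw in goal_lower:
--             best = min(best, i)
--     return list(_THEMES[best])
-- ===== Notes on version B (the rewrite author's own statement) =====
-- stated objective: alternative
-- what changed: Replaced the ordered if/elif chain of group tests by a flat keyword->group-index map over which one pass computes the minimum matching group index, then indexes a theme table (fallback = index 5).
import Mathlib
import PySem

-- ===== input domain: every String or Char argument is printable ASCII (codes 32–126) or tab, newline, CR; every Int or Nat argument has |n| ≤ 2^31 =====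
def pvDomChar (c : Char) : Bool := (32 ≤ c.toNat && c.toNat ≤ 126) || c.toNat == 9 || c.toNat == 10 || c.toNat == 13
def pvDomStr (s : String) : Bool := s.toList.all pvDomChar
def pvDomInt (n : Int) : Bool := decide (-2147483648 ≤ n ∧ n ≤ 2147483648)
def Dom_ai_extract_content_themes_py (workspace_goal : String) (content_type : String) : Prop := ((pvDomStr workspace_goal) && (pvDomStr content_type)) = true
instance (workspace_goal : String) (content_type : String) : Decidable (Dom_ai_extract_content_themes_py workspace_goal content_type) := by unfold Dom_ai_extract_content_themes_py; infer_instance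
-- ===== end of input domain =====

-- B replaces A's if/elif chain by a flat keyword->group-index map aggregated with min, then a table lookup: alternative decomposition, same cost.


-- ===== PORT A =====
def ai_extract_content_themes_py (workspace_goal : String) (content_type : String) : List String :=
  let goal_lower := PySem.Str.lower workspace_goal
  let _content_lower := PySem.Str.lower content_type
  if ["nurture", "education", "learning"].any (fun t => PySem.Str.isIn t goal_lower) then
    ["Educational", "Informative", "Skill-Building"]
  else if ["sales", "convert", "sell", "revenue"].any (fun t => PySem.Str.isIn t goal_lower) then
    ["Persuasive", "Value-Driven", "Results-Focused"]
  else if ["engage", "community", "social"].any (fun t => PySem.Str.isIn t goal_lower) then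
    ["Engaging", "Community-Building", "Interactive"]
  else if ["train", "fitness", "health", "workout"].any (fun t => PySem.Str.isIn t goal_lower) then
    ["Beginner-Friendly", "Progressive", "Advanced"]
  else if ["create", "build", "develop"].any (fun t => PySem.Str.isIn t goal_lower) then
    ["Foundational", "Progressive", "Advanced"]
  else
    ["Introductory", "Core", "Advanced"]

-- ===== PORT B =====
-- B's keyword -> group-index map (mirrors _KEYWORD_GROUP in Source B, insertion order)
def pvKeywordGroup : List (String × Nat) :=
  [("nurture", 0), ("education", 0), ("learning", 0),
   ("sales", 1), ("convert", 1), ("sell", 1), ("revenue", 1),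
   ("engage", 2), ("community", 2), ("social", 2),
   ("train", 3), ("fitness", 3), ("health", 3), ("workout", 3),
   ("create", 4), ("build", 4), ("develop", 4)]

-- B's theme table (mirrors _THEMES in Source B; index 5 is the fallback)
def pvThemes : List (List String) :=
  [["Educational", "Informative", "Skill-Building"],
   ["Persuasive", "Value-Driven", "Results-Focused"],
   ["Engaging", "Community-Building", "Interactive"],
   ["Beginner-Friendly", "Progressive", "Advanced"],
   ["Foundational", "Progressive", "Advanced"],
   ["Introductory", "Core", "Advanced"]]

def ai_extract_content_themes_py_alt (workspace_goal : String) (content_type : String) : List String :=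
  let goal_lower := PySem.Str.lower workspace_goal
  let best := pvKeywordGroup.foldl
    (fun best p => if PySem.Str.isIn p.1 goal_lower then min best p.2 else best) 5
  pvThemes.getD best []

-- ===== PRECONDITION & SPEC =====
def Spec_ai_extract_content_themes_py (workspace_goal : String) (content_type : String) (out : List String) : Prop := out = ai_extract_content_themes_py_alt workspace_goal content_type
instance (workspace_goal : String) (content_type : String) (out : List String) : Decidable (Spec_ai_extract_content_themes_py workspace_goal content_type out) := by unfold Spec_ai_extract_content_themes_py; infer_instance

-- ===== CLAIM (what is proved, stated in full; the proofs are below) =====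
def Claim_equal_ai_extract_content_themes_py : Prop := ∀ (workspace_goal : String) (content_type : String), Dom_ai_extract_content_themes_py workspace_goal content_type → Spec_ai_extract_content_themes_py workspace_goal content_type (ai_extract_content_themes_py workspace_goal content_type)

-- ===== LEMMAS AND PROOFS =====

-- folding B's min-accumulator over a run of keywords sharing one group index i
-- equals "if any keyword of the run matches, min acc i, else acc"
theorem pv_foldl_const_idx (g : String) (i : Nat) (ks : List String) (acc : Nat) :
    (ks.map (fun k => (k, i))).foldl
      (fun best p => if PySem.Str.isIn p.1 g then min best p.2 else best) acc
    = if ks.any (fun t => PySem.Str.isIn t g) then min acc i else acc := by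
  induction ks generalizing acc with
  | nil => simp
  | cons k ks ih =>
    simp only [List.map_cons, List.foldl_cons, List.any_cons, Bool.or_eq_true]
    rw [ih]
    by_cases h : PySem.Str.isIn k g = true
    · rw [if_pos h, if_pos (Or.inl h)]
      split_ifs <;> omega
    · rw [if_neg h]
      by_cases h2 : (ks.any fun t => PySem.Str.isIn t g) = true
      · rw [if_pos h2, if_pos (Or.inr h2)]
      · rw [if_neg h2, if_neg (fun hc => hc.elim h h2)]

theorem ai_extract_content_themes_py_spec' (wg ct : String) :
    ai_extract_content_themes_py wg ct = ai_extract_content_themes_py_alt wg ct := by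
  unfold ai_extract_content_themes_py ai_extract_content_themes_py_alt
  have htab : pvKeywordGroup =
      (["nurture", "education", "learning"].map (fun k => (k, 0)))
      ++ (["sales", "convert", "sell", "revenue"].map (fun k => (k, 1)))
      ++ (["engage", "community", "social"].map (fun k => (k, 2)))
      ++ (["train", "fitness", "health", "workout"].map (fun k => (k, 3)))
      ++ (["create", "build", "develop"].map (fun k => (k, 4))) := by rfl
  rw [htab]
  simp only [List.foldl_append, pv_foldl_const_idx]
  split_ifs <;> simp [pvThemes]

-- ===== VERDICT (by name: the statement is the Claim_ definition above) =====
theorem ai_extract_content_themes_py_spec : Claim_equal_ai_extract_content_themes_py := by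
  intro wg ct _
  exact ai_extract_content_themes_py_spec' wg ct
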